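-- pv_equiv track=rewrite | github.com/th3nolo/aave-v3-data | src/networks.py | validate_ethereum_address
-- ===== SOURCE A (Python) =====
-- def validate_ethereum_address(address: str) -> bool:
--     """
--     Validate Ethereum address format.
--
--     Args:
--         address: Address string to validate
--
--     Returns:
--         True if valid Ethereum address format
--     """
--     if not isinstance(address, str):
--         return False
--
--     # Check if it starts with 0x and has correct length
--     if not address.startswith('0x'):
--         return False
--
--     if len(address) != 42:  # 0x + 40 hex characters
--         return False
--
--     # Check if all characters after 0x are valid hex
--     hex_part = address[2:]
--     return all(c in '0123456789abcdefABCDEF' for c in hex_part)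
-- ===== SOURCE B (Python) =====
-- import re
--
-- _ETH_ADDR_RE = re.compile(r'0x[0-9a-fA-F]{40}')
--
-- def validate_ethereum_address(address: str) -> bool:
--     if not isinstance(address, str):
--         return False
--     return bool(_ETH_ADDR_RE.fullmatch(address))
-- ===== Notes on version B (the rewrite author's own statement) =====
-- stated objective: idiomatic
-- what changed: Replaced the explicit guard chain (startswith, length check, slice, per-character membership loop) with a single precompiled regex fullmatch of 0x[0-9a-fA-F]{40}.
import Mathlib
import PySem

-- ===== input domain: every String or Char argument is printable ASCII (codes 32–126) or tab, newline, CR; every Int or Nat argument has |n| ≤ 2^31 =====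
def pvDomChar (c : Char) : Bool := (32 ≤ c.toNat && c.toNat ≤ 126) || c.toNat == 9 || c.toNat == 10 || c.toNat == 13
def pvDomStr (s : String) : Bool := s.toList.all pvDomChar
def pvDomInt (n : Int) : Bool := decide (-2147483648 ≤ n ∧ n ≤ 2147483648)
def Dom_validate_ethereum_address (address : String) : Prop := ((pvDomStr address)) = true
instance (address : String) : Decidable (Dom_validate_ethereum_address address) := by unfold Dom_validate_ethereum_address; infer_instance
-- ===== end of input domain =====

-- B replaces A's explicit guard chain and per-character membership loop with a single regex fullmatch (more idiomatic); same cost.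


-- ===== PORT A =====
def validate_ethereum_address (address : String) : Bool :=
  -- isinstance(address, str) is always True under the type convention
  if ¬ PySem.Str.startswith address "0x" then false
  else if PySem.Str.len address ≠ 42 then false
  else
    -- hex_part = address[2:]; all(c in '0123456789abcdefABCDEF' for c in hex_part)
    let hex_part := PySem.Str.slice address (some 2) none
    hex_part.toList.all (fun c =>
      ['0','1','2','3','4','5','6','7','8','9','a','b','c','d','e','f','A','B','C','D','E','F'].contains c)

-- ===== PORT B =====
-- the regex character class [0-9a-fA-F]
def pvHexClass (c : Char) : Bool :=
  ('0' ≤ c && c ≤ '9') || ('a' ≤ c && c ≤ 'f') || ('A' ≤ c && c ≤ 'F')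

-- fullmatch of the regex 0x[0-9a-fA-F]{40}: the literal prefix '0x' followed by
-- exactly 40 repetitions of the character class
def validate_ethereum_address_alt (address : String) : Bool :=
  match address.toList with
  | '0' :: 'x' :: rest => rest.length == 40 && rest.all pvHexClass
  | _ => false

-- ===== PRECONDITION & SPEC =====
def Spec_validate_ethereum_address (address : String) (out : Bool) : Prop := out = validate_ethereum_address_alt address
instance (address : String) (out : Bool) : Decidable (Spec_validate_ethereum_address address out) := by unfold Spec_validate_ethereum_address; infer_instance

-- ===== CLAIM (what is proved, stated in full; the proofs are below) =====
def Claim_equal_validate_ethereum_address : Prop := ∀ (address : String), Dom_validate_ethereum_address address → Spec_validate_ethereum_address address (validate_ethereum_address address)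

-- ===== LEMMAS AND PROOFS =====

theorem charEqToNat (a b : Char) : (a = b) ↔ a.toNat = b.toNat := by
  constructor
  · intro h; rw [h]
  · intro h; exact Char.ext (UInt32.toNat_inj.mp h)

-- membership of a character in A's 22-character string equals B's character class
set_option maxRecDepth 8000 in
theorem hexContains_eq_pvHexClass (c : Char) :
    (['0','1','2','3','4','5','6','7','8','9','a','b','c','d','e','f','A','B','C','D','E','F'].contains c)
      = pvHexClass c := by
  simp only [List.contains_cons, List.contains_nil, Bool.or_false, pvHexClass]
  rw [Bool.eq_iff_iff]
  simp only [Bool.or_eq_true, Bool.and_eq_true, beq_iff_eq, decide_eq_true_eq,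
    Char.le_def, charEqToNat, UInt32.le_iff_toNat_le, Char.toNat]
  have h0 : '0'.val.toNat = 48 := rfl
  have h1 : '1'.val.toNat = 49 := rfl
  have h2 : '2'.val.toNat = 50 := rfl
  have h3 : '3'.val.toNat = 51 := rfl
  have h4 : '4'.val.toNat = 52 := rfl
  have h5 : '5'.val.toNat = 53 := rfl
  have h6 : '6'.val.toNat = 54 := rfl
  have h7 : '7'.val.toNat = 55 := rfl
  have h8 : '8'.val.toNat = 56 := rfl
  have h9 : '9'.val.toNat = 57 := rfl
  have ha : 'a'.val.toNat = 97 := rfl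
  have hb : 'b'.val.toNat = 98 := rfl
  have hc : 'c'.val.toNat = 99 := rfl
  have hd : 'd'.val.toNat = 100 := rfl
  have he : 'e'.val.toNat = 101 := rfl
  have hf : 'f'.val.toNat = 102 := rfl
  have hA : 'A'.val.toNat = 65 := rfl
  have hB : 'B'.val.toNat = 66 := rfl
  have hC : 'C'.val.toNat = 67 := rfl
  have hD : 'D'.val.toNat = 68 := rfl
  have hE : 'E'.val.toNat = 69 := rfl
  have hF : 'F'.val.toNat = 70 := rfl
  omega

theorem slice_two_toList (s : String) :
    (PySem.Str.slice s (some 2) none).toList = s.toList.drop 2 := by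
  simp [PySem.Str.slice, PySem.Chars.slice_eq_listSlice]
  rw [show (2:Int) = ((2:Nat):Int) by norm_num, PySem.List.slice_from_natCast]

theorem startswith_0x (s : String) :
    PySem.Str.startswith s "0x" = true ↔ ['0','x'] <+: s.toList := by
  simp [PySem.Chars.startswith_iff]

theorem keyList (l : List Char) :
    (match l with
     | '0' :: 'x' :: rest => rest.length == 40 && rest.all pvHexClass
     | _ => false)
    = (if ¬ (['0','x'] <+: l) then false
       else if (l.length : Int) ≠ 42 then false
       else (l.drop 2).all pvHexClass) := by
  split
  · next rest =>
    simp only [List.length_cons, List.drop_succ_cons, List.drop_zero]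
    rw [if_neg (not_not_intro ⟨rest, rfl⟩)]
    by_cases h40 : rest.length = 40
    · rw [if_neg (by push_cast; omega)]
      simp [h40]
    · rw [if_pos (by push_cast; omega)]
      simp [h40]
  · next h =>
    rw [if_pos]
    intro hpre
    obtain ⟨t, ht⟩ := hpre
    exact h t ht.symm

-- ===== VERDICT (by name: the statement is the Claim_ definition above) =====
theorem validate_ethereum_address_spec : Claim_equal_validate_ethereum_address := by
  intro address _
  unfold Spec_validate_ethereum_address validate_ethereum_address validate_ethereum_address_alt
  have hA :
      (if ¬ PySem.Str.startswith address "0x" then false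
       else if PySem.Str.len address ≠ 42 then false
       else (PySem.Str.slice address (some 2) none).toList.all (fun c =>
         ['0','1','2','3','4','5','6','7','8','9','a','b','c','d','e','f','A','B','C','D','E','F'].contains c))
      = (if ¬ (['0','x'] <+: address.toList) then false
         else if (address.toList.length : Int) ≠ 42 then false
         else (address.toList.drop 2).all pvHexClass) := by
    simp only [startswith_0x, PySem.Str.len_eq, slice_two_toList, hexContains_eq_pvHexClass]
  rw [hA, ← keyList]
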